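-- pv_equiv track=rewrite | github.com/odg20000/MECS_handSign | video3.py | merge_predicate
-- ===== SOURCE A (Python) =====
-- def merge_predicate(pos, predicate, time_ep):
--     k = []
--     for i in range(len(pos)):
--         try:
--             if pos[i][2] == 'P':
--                 k.append(i)
--         except IndexError as E:
--             pass
--     if len(k) > 1:
--         tmp = 0
--         for j in k:
--             del pos[j - tmp]
--             tmp += 1
--         if time_ep != '':
--             t = [predicate, 'V_process', 'P', time_ep]
--             pos.append(t)
--         else:
--             t = [predicate, 'V_process', 'P']
--             pos.append(t)
--     return pos
-- ===== SOURCE B (Python) =====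
-- def _is_p(row):
--     try:
--         return row[2] == 'P'
--     except IndexError:
--         return False
--
--
-- def merge_predicate(pos, predicate, time_ep):
--     if sum(1 for row in pos if _is_p(row)) > 1:
--         pos[:] = [row for row in pos if not _is_p(row)]
--         pos.append([predicate, 'V_process', 'P', time_ep]
--                    if time_ep != '' else [predicate, 'V_process', 'P'])
--     return pos
-- ===== Notes on version B (the rewrite author's own statement) =====
-- stated objective: simpler
-- what changed: B replaces A's two mutation passes (collect P-row indices, then delete them with a running offset) by a single count followed by a filter-rebuild, with the short-row IndexError guard factored into a tiny helper.
import Mathlib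
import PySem

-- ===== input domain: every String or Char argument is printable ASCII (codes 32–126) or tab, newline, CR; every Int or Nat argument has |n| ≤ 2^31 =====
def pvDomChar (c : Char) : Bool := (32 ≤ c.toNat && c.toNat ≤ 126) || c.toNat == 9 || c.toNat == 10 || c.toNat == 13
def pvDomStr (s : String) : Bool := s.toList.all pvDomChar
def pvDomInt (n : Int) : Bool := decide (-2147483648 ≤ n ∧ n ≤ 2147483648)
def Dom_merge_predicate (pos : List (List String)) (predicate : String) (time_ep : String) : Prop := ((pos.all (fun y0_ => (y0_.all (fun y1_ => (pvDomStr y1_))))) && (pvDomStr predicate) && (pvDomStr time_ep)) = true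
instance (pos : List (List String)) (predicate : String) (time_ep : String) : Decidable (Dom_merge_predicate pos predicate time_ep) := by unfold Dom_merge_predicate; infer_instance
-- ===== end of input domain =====

-- B replaces A's index-collection + offset-deletion passes by a count and a filter-rebuild (objective: simpler).
-- Both Pythons mutate `pos` in place in the same observable way; the equivalence proved here is about the return value.

-- ===== PORT A =====
-- 'try: if pos[i][2] == 'P': k.append(i) except IndexError: pass'
def mpIsPStep (pos : List (List String)) (k : List Int) (i : Int) : List Int :=
  match PySem.List.pyGet? pos i with
  | none => k
  | some row =>
    match PySem.List.pyGet? row 2 with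
    | none => k
    | some s => if s == "P" then k ++ [i] else k

-- 'del pos[j - tmp]; tmp += 1' (the none branch is the IndexError case, unreachable for A's indices)
def mpDelStep (st : List (List String) × Int) (j : Int) : List (List String) × Int :=
  match PySem.List.pop? st.1 (j - st.2) with
  | some r => (r.2, st.2 + 1)
  | none => (st.1, st.2 + 1)

def merge_predicate (pos : List (List String)) (predicate : String) (time_ep : String) : List (List String) :=
  let k := (PySem.List.pyRange 0 (pos.length : Int) 1).foldl (mpIsPStep pos) []
  if k.length > 1 then
    let pos1 := (k.foldl mpDelStep (pos, 0)).1
    if time_ep ≠ "" then pos1 ++ [[predicate, "V_process", "P", time_ep]]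
    else pos1 ++ [[predicate, "V_process", "P"]]
  else pos

-- ===== PORT B =====
-- '_is_p(row)': row[2] == 'P', IndexError (short row) gives False
def mpIsP (row : List String) : Bool :=
  match PySem.List.pyGet? row 2 with
  | some s => s == "P"
  | none => false

def merge_predicate_alt (pos : List (List String)) (predicate : String) (time_ep : String) : List (List String) :=
  if pos.countP mpIsP > 1 then
    pos.filter (fun r => !mpIsP r) ++
      [if time_ep ≠ "" then [predicate, "V_process", "P", time_ep]
       else [predicate, "V_process", "P"]]
  else pos

-- ===== PRECONDITION & SPEC =====
def Spec_merge_predicate (pos : List (List String)) (predicate : String) (time_ep : String) (out : List (List String)) : Prop := out = merge_predicate_alt pos predicate time_ep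
instance (pos : List (List String)) (predicate : String) (time_ep : String) (out : List (List String)) : Decidable (Spec_merge_predicate pos predicate time_ep out) := by unfold Spec_merge_predicate; infer_instance

-- ===== CLAIM (what is proved, stated in full; the proofs are below) =====
def Claim_equal_merge_predicate : Prop := ∀ (pos : List (List String)) (predicate : String) (time_ep : String), Dom_merge_predicate pos predicate time_ep → Spec_merge_predicate pos predicate time_ep (merge_predicate pos predicate time_ep)

-- ===== LEMMAS AND PROOFS =====

-- the ascending list of (absolute) indices of P-rows of `l`, starting at offset t
def mpIdxFrom : List (List String) → Int → List Int
  | [], _ => []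
  | r :: rs, t => if mpIsP r then t :: mpIdxFrom rs (t + 1) else mpIdxFrom rs (t + 1)

theorem mpIdxFrom_length (l : List (List String)) : ∀ t : Int, (mpIdxFrom l t).length = l.countP mpIsP := by
  induction l with
  | nil => intro t; simp [mpIdxFrom]
  | cons r rs ih =>
    intro t
    by_cases h : mpIsP r <;> simp [mpIdxFrom, h, ih]

theorem mpIdxFrom_shift (l : List (List String)) : ∀ t : Int, (mpIdxFrom l (t + 1)).map (· - 1) = mpIdxFrom l t := by
  induction l with
  | nil => intro t; simp [mpIdxFrom]
  | cons r rs ih =>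
    intro t
    by_cases h : mpIsP r
    · simp only [mpIdxFrom, h, if_pos, List.map_cons]
      rw [show t + 1 - 1 = t by ring]
      have := ih (t + 1)
      rw [this]
    · simp only [mpIdxFrom, h, Bool.false_eq_true, if_neg, not_false_iff]
      exact ih (t + 1)

theorem mpIdxFrom_ge (l : List (List String)) : ∀ (t : Int) (m : Nat) (h : m < (mpIdxFrom l t).length),
    t + m ≤ (mpIdxFrom l t)[m] := by
  induction l with
  | nil => intro t m h; simp [mpIdxFrom] at h
  | cons r rs ih =>
    intro t m h
    by_cases hp : mpIsP r
    · simp only [mpIdxFrom, hp, if_pos] at h ⊢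
      cases m with
      | zero => simp
      | succ m =>
        simp only [List.getElem_cons_succ]
        have := ih (t + 1) m (by simpa using h)
        push_cast at this ⊢
        omega
    · simp only [mpIdxFrom, hp, if_neg, Bool.false_eq_true, not_false_iff] at h ⊢
      have := ih (t + 1) m h
      omega

theorem mpMatch_aux (o : Option String) (acc : List Int) (v : Int) :
    (match o with
      | none => acc
      | some s => if s == "P" then acc ++ [v] else acc)
    = if (match o with
        | some s => s == "P"
        | none => false) then acc ++ [v] else acc := by
  cases o with
  | none => simp
  | some s => by_cases hs : s == "P" <;> simp [hs]

-- k (A's first loop) is exactly mpIdxFrom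
theorem mpK_eq (suf : List (List String)) : ∀ (pre : List (List String)) (acc : List Int),
    (PySem.List.pyRange (pre.length : Int) ((pre.length : Int) + (suf.length : Int)) 1).foldl
      (mpIsPStep (pre ++ suf)) acc
    = acc ++ mpIdxFrom suf (pre.length : Int) := by
  induction suf with
  | nil => intro pre acc; simp [PySem.List.pyRange_one_eq_nil, mpIdxFrom]
  | cons r rs ih =>
    intro pre acc
    have hlt : (pre.length : Int) < (pre.length : Int) + ((r :: rs).length : Int) := by
      simp only [List.length_cons]
      push_cast
      omega
    rw [PySem.List.pyRange_one_cons hlt, List.foldl_cons]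
    have hstep : mpIsPStep (pre ++ r :: rs) acc (pre.length : Int)
        = if mpIsP r then acc ++ [(pre.length : Int)] else acc := by
      simp only [mpIsPStep, PySem.List.pyGet?_append_length, mpIsP]
      exact mpMatch_aux (PySem.List.pyGet? r 2) acc (pre.length : Int)
    rw [hstep]
    have harith : (pre.length : Int) + 1 = (((pre ++ [r]).length : Nat) : Int) := by
      simp
    have harith2 : (pre.length : Int) + ((r :: rs).length : Int)
        = (((pre ++ [r]).length : Nat) : Int) + (rs.length : Int) := by
      simp; omega
    have hlist : pre ++ r :: rs = (pre ++ [r]) ++ rs := by simp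
    by_cases hp : mpIsP r
    · rw [if_pos hp, harith, harith2, hlist, ih (pre ++ [r]) (acc ++ [(pre.length : Int)])]
      simp [mpIdxFrom, hp]
    · rw [if_neg hp, harith, harith2, hlist, ih (pre ++ [r]) acc]
      simp [mpIdxFrom, hp]

theorem mpPop_cons_pos {α : Type} (x : α) (xs : List α) (d : Int) (hd : 1 ≤ d) :
    PySem.List.pop? (x :: xs) d = (PySem.List.pop? xs (d - 1)).map (fun p => (p.1, x :: p.2)) := by
  simp only [PySem.List.pop?, PySem.List.pyIdx?]
  have h0 : (0 : Int) ≤ d := by omega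
  have h0' : (0 : Int) ≤ d - 1 := by omega
  rw [if_pos h0, if_pos h0']
  by_cases hlt : d - 1 < (xs.length : Int)
  · have hlt' : d < ((x :: xs).length : Int) := by simp; omega
    rw [if_pos hlt', if_pos hlt]
    have hn : d.toNat = (d - 1).toNat + 1 := by omega
    rw [hn]
    simp [List.eraseIdx_cons_succ]
    cases xs[d.toNat - 1]? <;> simp
  · have hlt' : ¬ d < ((x :: xs).length : Int) := by simp at hlt ⊢; omega
    rw [if_neg hlt', if_neg hlt]
    simp

-- pushing a cons through the deletion fold when every index stays ≥ 1 relative to the running offset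
theorem mpDel_cons (K : List Int) : ∀ (xs : List (List String)) (x : List String) (t : Int),
    (∀ (m : Nat) (h : m < K.length), t + m + 1 ≤ K[m]) →
    K.foldl mpDelStep (x :: xs, t)
      = (x :: ((K.map (· - 1)).foldl mpDelStep (xs, t)).1, t + (K.length : Int)) := by
  induction K with
  | nil =>
    intro xs x t _
    simp only [List.foldl_nil, List.map_nil, List.length_nil, Nat.cast_zero, add_zero]
  | cons j K' ih =>
    intro xs x t hge
    have hj : 1 ≤ j - t := by
      have h0 := hge 0 (by simp)
      simp at h0
      omega
    rw [List.foldl_cons, List.map_cons, List.foldl_cons]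
    have hpop := mpPop_cons_pos x xs (j - t) hj
    have hKtail : ∀ (m : Nat) (h : m < K'.length), (t + 1) + m + 1 ≤ K'[m] := by
      intro m h
      have h1 := hge (m + 1) (by simp; omega)
      simp at h1
      omega
    have hlen : t + ((j :: K').length : Int) = (t + 1) + (K'.length : Int) := by
      simp only [List.length_cons]
      push_cast
      ring
    simp only [mpDelStep]
    cases hp : PySem.List.pop? xs (j - t - 1) with
    | none =>
      have : PySem.List.pop? (x :: xs) (j - t) = none := by rw [hpop, hp]; rfl
      rw [this]
      have harg : j - 1 - t = j - t - 1 := by ring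
      rw [harg, hp]
      rw [ih xs x (t + 1) hKtail, hlen]
    | some r =>
      have : PySem.List.pop? (x :: xs) (j - t) = some (r.1, x :: r.2) := by rw [hpop, hp]; rfl
      rw [this]
      have harg : j - 1 - t = j - t - 1 := by ring
      rw [harg, hp]
      rw [ih r.2 x (t + 1) hKtail, hlen]

-- the deletion loop over the P-indices is exactly filter-out
theorem mpDel_filter (l : List (List String)) : ∀ t : Int,
    ((mpIdxFrom l t).foldl mpDelStep (l, t)).1 = l.filter (fun r => !mpIsP r) := by
  induction l with
  | nil => intro t; simp [mpIdxFrom]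
  | cons r rs ih =>
    intro t
    by_cases hp : mpIsP r
    · simp only [mpIdxFrom, hp, if_pos, List.foldl_cons]
      have hstep : mpDelStep (r :: rs, t) t = (rs, t + 1) := by
        simp [mpDelStep, PySem.List.pop?, PySem.List.pyIdx?]
      rw [hstep, ih (t + 1)]
      simp [hp]
    · simp only [mpIdxFrom, hp, Bool.false_eq_true, if_neg, not_false_iff]
      have hge : ∀ (m : Nat) (h : m < (mpIdxFrom rs (t + 1)).length),
          t + m + 1 ≤ (mpIdxFrom rs (t + 1))[m] := by
        intro m h
        have := mpIdxFrom_ge rs (t + 1) m h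
        omega
      rw [mpDel_cons (mpIdxFrom rs (t + 1)) rs r t hge]
      have hmap : (mpIdxFrom rs (t + 1)).map (· - 1) = mpIdxFrom rs t := mpIdxFrom_shift rs t
      rw [hmap, ih t]
      simp [hp]

-- ===== VERDICT (by name: the statement is the Claim_ definition above) =====
theorem merge_predicate_spec : Claim_equal_merge_predicate := by
  intro pos predicate time_ep _
  unfold Spec_merge_predicate merge_predicate merge_predicate_alt
  have hk : (PySem.List.pyRange 0 (pos.length : Int) 1).foldl (mpIsPStep pos) []
      = mpIdxFrom pos 0 := by
    have := mpK_eq pos [] []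
    simpa using this
  simp only [hk, mpIdxFrom_length pos 0, mpDel_filter pos 0]
  split_ifs <;> rfl
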